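-- pv_equiv track=rewrite | github.com/Harshini070907/Harshini-Anandaraj | question-evaluator/modules/classifier.py | classify_questions_list
-- ===== SOURCE A (Python) =====
-- def classify_question(question):
--     question = question.lower()
--
--     easy = ["define", "list", "state", "identify", "name"]
--
--     medium = ["explain", "describe", "summarize", "interpret", "apply"]
--
--     hard = [
--         "analyze", "compare", "evaluate", "justify", "criticize",
--         "differentiate", "distinguish", "discuss", "examine", "illustrate"
--     ]
--
--     # PRIORITY: HARD → MEDIUM → EASY
--     if any(word in question for word in hard):
--         return "Hard"
--
--     elif any(word in question for word in medium):
--         return "Medium"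
--
--     elif any(word in question for word in easy):
--         return "Easy"
--
--     else:
--         return "Medium"
--
-- def classify_questions_list(questions):
--     result = {
--         "Easy": [],
--         "Medium": [],
--         "Hard": []
--     }
--
--     for q in questions:
--         q = q.strip()
--         if not q:
--             continue
--
--         category = classify_question(q)
--         result[category].append(q)
--
--     return result
-- ===== SOURCE B (Python) =====
-- _EASY = ["define", "list", "state", "identify", "name"]
-- _MEDIUM = ["explain", "describe", "summarize", "interpret", "apply"]
-- _HARD = ["analyze", "compare", "evaluate", "justify", "criticize",
--          "differentiate", "distinguish", "discuss", "examine", "illustrate"]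
-- # one keyword table: keyword -> priority rank (Hard=3, Medium=2, Easy=1)
-- _KEYWORDS = [(w, 3) for w in _HARD] + [(w, 2) for w in _MEDIUM] + [(w, 1) for w in _EASY]
--
--
-- def _rank(question):
--     ql = question.lower()
--     ranks = [r for w, r in _KEYWORDS if w in ql]
--     return max(ranks, default=2)
--
--
-- def classify_questions_list(questions):
--     ranked = [(q, _rank(q)) for q in (p.strip() for p in questions) if q]
--     return {cat: [q for q, r in ranked if r == rk]
--             for cat, rk in [("Easy", 1), ("Medium", 2), ("Hard", 3)]}
-- ===== Notes on version B (the rewrite author's own statement) =====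
-- stated objective: simpler
-- what changed: Replaces the priority-ordered chain of three any() short-circuit checks with a single keyword->rank table scanned once per question, taking the maximum matched rank (default Medium), and replaces the mutable dict-of-buckets loop with a rank-then-group comprehension.
import Mathlib
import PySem

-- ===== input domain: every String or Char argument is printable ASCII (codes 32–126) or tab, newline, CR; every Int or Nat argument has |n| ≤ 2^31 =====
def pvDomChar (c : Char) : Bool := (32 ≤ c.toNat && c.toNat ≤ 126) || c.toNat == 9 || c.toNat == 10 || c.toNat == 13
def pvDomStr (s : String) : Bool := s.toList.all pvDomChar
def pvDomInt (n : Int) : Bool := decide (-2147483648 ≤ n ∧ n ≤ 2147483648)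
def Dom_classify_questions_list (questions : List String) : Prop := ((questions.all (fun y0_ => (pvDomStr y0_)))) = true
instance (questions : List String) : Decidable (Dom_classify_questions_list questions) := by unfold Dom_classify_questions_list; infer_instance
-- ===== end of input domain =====

-- B replaces A's priority-ordered chain of three any() checks by one keyword→rank table scanned
-- once per question (maximum matched rank, default Medium) and groups the pre-ranked questions
-- by rank instead of appending into a mutable dict: a simpler decomposition, same exact results.

-- ===== PORT A =====
def classify_question (question : String) : String :=
  let question := PySem.Str.lower question
  let easy : List String := ["define", "list", "state", "identify", "name"]
  let medium : List String := ["explain", "describe", "summarize", "interpret", "apply"]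
  let hard : List String := ["analyze", "compare", "evaluate", "justify", "criticize",
    "differentiate", "distinguish", "discuss", "examine", "illustrate"]
  -- PRIORITY: HARD → MEDIUM → EASY
  if hard.any (fun word => PySem.Str.isIn word question) then "Hard"
  else if medium.any (fun word => PySem.Str.isIn word question) then "Medium"
  else if easy.any (fun word => PySem.Str.isIn word question) then "Easy"
  else "Medium"

def classify_questions_list (questions : List String) : List (String × List String) :=
  let result : PySem.Dict String (List String) :=
    ((PySem.Dict.empty.insert "Easy" []).insert "Medium" []).insert "Hard" []
  (questions.foldl
    (fun result q =>
      let q := PySem.Str.strip q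
      if q = "" then result
      else result.modify (classify_question q) [] (fun l => l ++ [q]))
    result).items

-- ===== PORT B =====
def pvKeywords : List (String × Int) :=
  (["analyze", "compare", "evaluate", "justify", "criticize",
    "differentiate", "distinguish", "discuss", "examine", "illustrate"]).map (fun w => (w, 3))
  ++ (["explain", "describe", "summarize", "interpret", "apply"]).map (fun w => (w, 2))
  ++ (["define", "list", "state", "identify", "name"]).map (fun w => (w, 1))

def pvRank (question : String) : Int :=
  let ql := PySem.Str.lower question
  let ranks := (pvKeywords.filter (fun p => PySem.Str.isIn p.1 ql)).map Prod.snd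
  PySem.List.maxD ranks (fun y => y) 2

def classify_questions_list_alt (questions : List String) : List (String × List String) :=
  let ranked := ((questions.map PySem.Str.strip).filter (fun q => q ≠ "")).map (fun q => (q, pvRank q))
  ([("Easy", (1 : Int)), ("Medium", 2), ("Hard", 3)]).map
    (fun cr => (cr.1, (ranked.filter (fun p => p.2 == cr.2)).map Prod.fst))

-- ===== PRECONDITION & SPEC =====
def Spec_classify_questions_list (questions : List String) (out : List (String × List String)) : Prop := out = classify_questions_list_alt questions
instance (questions : List String) (out : List (String × List String)) : Decidable (Spec_classify_questions_list questions out) := by unfold Spec_classify_questions_list; infer_instance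

-- ===== CLAIM (what is proved, stated in full; the proofs are below) =====
def Claim_equal_classify_questions_list : Prop := ∀ (questions : List String), Dom_classify_questions_list questions → Spec_classify_questions_list questions (classify_questions_list questions)

-- ===== LEMMAS AND PROOFS =====

-- the cleaned questions of rank k, in order (proof-only helper)
def pvBucket (k : Int) (questions : List String) : List String :=
  ((questions.map PySem.Str.strip).filter (fun q => q ≠ "")).filter (fun q => pvRank q == k)

theorem pvShape (ql : String) (Hl Ml El : List String) :
    (((Hl.map (fun w => (w, (3 : Int))) ++ Ml.map (fun w => (w, (2 : Int)))
        ++ El.map (fun w => (w, (1 : Int)))).filter (fun p => PySem.Str.isIn p.1 ql)).map Prod.snd)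
    = (Hl.filter (fun w => PySem.Str.isIn w ql)).map (fun _ => (3 : Int))
      ++ (Ml.filter (fun w => PySem.Str.isIn w ql)).map (fun _ => (2 : Int))
      ++ (El.filter (fun w => PySem.Str.isIn w ql)).map (fun _ => (1 : Int)) := by
  simp [List.filter_append, List.filter_map, List.map_map, Function.comp_def]

theorem pvSelect (ql : String) (Hl Ml El : List String) :
    (PySem.List.max?
        ((Hl.filter (fun w => PySem.Str.isIn w ql)).map (fun _ => (3 : Int))
          ++ (Ml.filter (fun w => PySem.Str.isIn w ql)).map (fun _ => (2 : Int))
          ++ (El.filter (fun w => PySem.Str.isIn w ql)).map (fun _ => (1 : Int)))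
        (fun y => y)).getD 2
    = (if Hl.any (fun w => PySem.Str.isIn w ql) then (3 : Int)
       else if Ml.any (fun w => PySem.Str.isIn w ql) then 2
       else if El.any (fun w => PySem.Str.isIn w ql) then 1
       else 2) := by
  by_cases hH : Hl.any (fun w => PySem.Str.isIn w ql) = true
  · obtain ⟨w, hw, hpw⟩ := List.any_eq_true.mp hH
    have h3 : (3 : Int) ∈ (Hl.filter (fun w => PySem.Str.isIn w ql)).map (fun _ => (3 : Int))
        ++ (Ml.filter (fun w => PySem.Str.isIn w ql)).map (fun _ => (2 : Int))
        ++ (El.filter (fun w => PySem.Str.isIn w ql)).map (fun _ => (1 : Int)) := by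
      apply List.mem_append_left
      apply List.mem_append_left
      exact List.mem_map.2 ⟨w, List.mem_filter.2 ⟨hw, hpw⟩, rfl⟩
    obtain ⟨m, hmx⟩ : ∃ m, PySem.List.max?
        ((Hl.filter (fun w => PySem.Str.isIn w ql)).map (fun _ => (3 : Int))
          ++ (Ml.filter (fun w => PySem.Str.isIn w ql)).map (fun _ => (2 : Int))
          ++ (El.filter (fun w => PySem.Str.isIn w ql)).map (fun _ => (1 : Int)))
        (fun y => y) = some m := by
      cases h' : PySem.List.max?
          ((Hl.filter (fun w => PySem.Str.isIn w ql)).map (fun _ => (3 : Int))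
            ++ (Ml.filter (fun w => PySem.Str.isIn w ql)).map (fun _ => (2 : Int))
            ++ (El.filter (fun w => PySem.Str.isIn w ql)).map (fun _ => (1 : Int)))
          (fun y => y) with
      | none => rw [PySem.List.max?_eq_none_iff] at h'; rw [h'] at h3; simp at h3
      | some m => exact ⟨m, rfl⟩
    rw [hmx, if_pos hH]
    have hmem := PySem.List.max?_mem hmx
    have hcases : m = 3 ∨ m = 2 ∨ m = 1 := by
      rcases List.mem_append.1 hmem with h1 | h1
      · rcases List.mem_append.1 h1 with h2 | h2
        · obtain ⟨a, _, rfl⟩ := List.mem_map.1 h2; left; rfl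
        · obtain ⟨a, _, rfl⟩ := List.mem_map.1 h2; right; left; rfl
      · obtain ⟨a, _, rfl⟩ := List.mem_map.1 h1; right; right; rfl
    have h3le : (3 : Int) ≤ m := by simpa using PySem.List.max?_isMax hmx 3 h3
    have hm3 : m = 3 := by omega
    simp [hm3]
  · have hfil : Hl.filter (fun w => PySem.Str.isIn w ql) = [] := by
      rw [List.filter_eq_nil_iff]
      intro a ha hpa
      exact hH (List.any_eq_true.2 ⟨a, ha, hpa⟩)
    rw [hfil, if_neg hH]
    simp only [List.map_nil, List.nil_append]
    by_cases hM : Ml.any (fun w => PySem.Str.isIn w ql) = true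
    · obtain ⟨w, hw, hpw⟩ := List.any_eq_true.mp hM
      have h2 : (2 : Int) ∈ (Ml.filter (fun w => PySem.Str.isIn w ql)).map (fun _ => (2 : Int))
          ++ (El.filter (fun w => PySem.Str.isIn w ql)).map (fun _ => (1 : Int)) := by
        apply List.mem_append_left
        exact List.mem_map.2 ⟨w, List.mem_filter.2 ⟨hw, hpw⟩, rfl⟩
      obtain ⟨m, hmx⟩ : ∃ m, PySem.List.max?
          ((Ml.filter (fun w => PySem.Str.isIn w ql)).map (fun _ => (2 : Int))
            ++ (El.filter (fun w => PySem.Str.isIn w ql)).map (fun _ => (1 : Int)))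
          (fun y => y) = some m := by
        cases h' : PySem.List.max?
            ((Ml.filter (fun w => PySem.Str.isIn w ql)).map (fun _ => (2 : Int))
              ++ (El.filter (fun w => PySem.Str.isIn w ql)).map (fun _ => (1 : Int)))
            (fun y => y) with
        | none => rw [PySem.List.max?_eq_none_iff] at h'; rw [h'] at h2; simp at h2
        | some m => exact ⟨m, rfl⟩
      rw [hmx, if_pos hM]
      have hmem := PySem.List.max?_mem hmx
      have hcases : m = 2 ∨ m = 1 := by
        rcases List.mem_append.1 hmem with h1 | h1
        · obtain ⟨a, _, rfl⟩ := List.mem_map.1 h1; left; rfl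
        · obtain ⟨a, _, rfl⟩ := List.mem_map.1 h1; right; rfl
      have h2le : (2 : Int) ≤ m := by simpa using PySem.List.max?_isMax hmx 2 h2
      have hm2 : m = 2 := by omega
      simp [hm2]
    · have hfil2 : Ml.filter (fun w => PySem.Str.isIn w ql) = [] := by
        rw [List.filter_eq_nil_iff]
        intro a ha hpa
        exact hM (List.any_eq_true.2 ⟨a, ha, hpa⟩)
      rw [hfil2, if_neg hM]
      simp only [List.map_nil, List.nil_append]
      by_cases hE : El.any (fun w => PySem.Str.isIn w ql) = true
      · obtain ⟨w, hw, hpw⟩ := List.any_eq_true.mp hE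
        have h1 : (1 : Int) ∈ (El.filter (fun w => PySem.Str.isIn w ql)).map (fun _ => (1 : Int)) :=
          List.mem_map.2 ⟨w, List.mem_filter.2 ⟨hw, hpw⟩, rfl⟩
        obtain ⟨m, hmx⟩ : ∃ m, PySem.List.max?
            ((El.filter (fun w => PySem.Str.isIn w ql)).map (fun _ => (1 : Int)))
            (fun y => y) = some m := by
          cases h' : PySem.List.max?
              ((El.filter (fun w => PySem.Str.isIn w ql)).map (fun _ => (1 : Int)))
              (fun y => y) with
          | none => rw [PySem.List.max?_eq_none_iff] at h'; rw [h'] at h1; simp at h1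
          | some m => exact ⟨m, rfl⟩
        rw [hmx, if_pos hE]
        have hmem := PySem.List.max?_mem hmx
        obtain ⟨a, _, rfl⟩ := List.mem_map.1 hmem
        simp
      · have hfil3 : El.filter (fun w => PySem.Str.isIn w ql) = [] := by
          rw [List.filter_eq_nil_iff]
          intro a ha hpa
          exact hE (List.any_eq_true.2 ⟨a, ha, hpa⟩)
        rw [hfil3, if_neg hE]
        simp only [List.map_nil]
        rw [(PySem.List.max?_eq_none_iff _ _).2 rfl]
        rfl

theorem pvRank_spec (q : String) :
    pvRank q =
      (if (["analyze", "compare", "evaluate", "justify", "criticize",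
            "differentiate", "distinguish", "discuss", "examine", "illustrate"] : List String).any
            (fun w => PySem.Str.isIn w (PySem.Str.lower q)) then (3 : Int)
       else if (["explain", "describe", "summarize", "interpret", "apply"] : List String).any
            (fun w => PySem.Str.isIn w (PySem.Str.lower q)) then 2
       else if (["define", "list", "state", "identify", "name"] : List String).any
            (fun w => PySem.Str.isIn w (PySem.Str.lower q)) then 1
       else 2) := by
  simp only [pvRank, pvKeywords, PySem.List.maxD]
  rw [pvShape, pvSelect]

theorem pvRank_cases (q : String) :
    pvRank q = 1 ∨ pvRank q = 2 ∨ pvRank q = 3 := by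
  rw [pvRank_spec]
  split_ifs <;> simp

theorem classify_question_eq (q : String) :
    classify_question q =
      (if pvRank q = 3 then "Hard" else if pvRank q = 2 then "Medium" else "Easy") := by
  simp only [classify_question]
  rw [pvRank_spec]
  generalize (["analyze", "compare", "evaluate", "justify", "criticize",
      "differentiate", "distinguish", "discuss", "examine", "illustrate"] : List String).any
      (fun w => PySem.Str.isIn w (PySem.Str.lower q)) = bH
  generalize (["explain", "describe", "summarize", "interpret", "apply"] : List String).any
      (fun w => PySem.Str.isIn w (PySem.Str.lower q)) = bM
  generalize (["define", "list", "state", "identify", "name"] : List String).any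
      (fun w => PySem.Str.isIn w (PySem.Str.lower q)) = bE
  cases bH <;> cases bM <;> cases bE <;> simp

theorem pvLoop (qs : List String) (e m h : List String) :
    (qs.foldl
      (fun result q =>
        let q := PySem.Str.strip q
        if q = "" then result
        else result.modify (classify_question q) [] (fun l => l ++ [q]))
      (PySem.Dict.mk [("Easy", e), ("Medium", m), ("Hard", h)])).items =
    [("Easy", e ++ pvBucket 1 qs), ("Medium", m ++ pvBucket 2 qs), ("Hard", h ++ pvBucket 3 qs)] := by
  induction qs generalizing e m h with
  | nil => simp [pvBucket]
  | cons q qs ih =>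
    simp only [List.foldl_cons]
    by_cases hq : PySem.Str.strip q = ""
    · have hb : ∀ k, pvBucket k (q :: qs) = pvBucket k qs := by
        intro k; simp [pvBucket, hq]
      rw [if_pos hq, ih, hb, hb, hb]
    · rw [if_neg hq]
      have hb : ∀ k : Int, pvRank (PySem.Str.strip q) = k →
          pvBucket k (q :: qs) = PySem.Str.strip q :: pvBucket k qs := by
        intro k hk; simp [pvBucket, hq, hk]
      have hb' : ∀ k : Int, pvRank (PySem.Str.strip q) ≠ k →
          pvBucket k (q :: qs) = pvBucket k qs := by
        intro k hk; simp [pvBucket, hq, hk]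
      rcases pvRank_cases (PySem.Str.strip q) with hr | hr | hr
      · have hcat : classify_question (PySem.Str.strip q) = "Easy" := by
          rw [classify_question_eq, hr]; norm_num
        rw [hcat]
        have hd : (PySem.Dict.mk [("Easy", e), ("Medium", m), ("Hard", h)]).modify "Easy" []
            (fun l => l ++ [PySem.Str.strip q])
            = PySem.Dict.mk [("Easy", e ++ [PySem.Str.strip q]), ("Medium", m), ("Hard", h)] := rfl
        rw [hd, ih, hb 1 hr, hb' 2 (by omega), hb' 3 (by omega)]
        simp
      · have hcat : classify_question (PySem.Str.strip q) = "Medium" := by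
          rw [classify_question_eq, hr]; norm_num
        rw [hcat]
        have hd : (PySem.Dict.mk [("Easy", e), ("Medium", m), ("Hard", h)]).modify "Medium" []
            (fun l => l ++ [PySem.Str.strip q])
            = PySem.Dict.mk [("Easy", e), ("Medium", m ++ [PySem.Str.strip q]), ("Hard", h)] := rfl
        rw [hd, ih, hb 2 hr, hb' 1 (by omega), hb' 3 (by omega)]
        simp
      · have hcat : classify_question (PySem.Str.strip q) = "Hard" := by
          rw [classify_question_eq, hr]; norm_num
        rw [hcat]
        have hd : (PySem.Dict.mk [("Easy", e), ("Medium", m), ("Hard", h)]).modify "Hard" []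
            (fun l => l ++ [PySem.Str.strip q])
            = PySem.Dict.mk [("Easy", e), ("Medium", m), ("Hard", h ++ [PySem.Str.strip q])] := rfl
        rw [hd, ih, hb 3 hr, hb' 1 (by omega), hb' 2 (by omega)]
        simp

theorem pvAlt_eq (qs : List String) :
    classify_questions_list_alt qs =
    [("Easy", pvBucket 1 qs), ("Medium", pvBucket 2 qs), ("Hard", pvBucket 3 qs)] := by
  simp [classify_questions_list_alt, pvBucket, List.filter_map, List.map_map, Function.comp_def]

-- ===== VERDICT (by name: the statement is the Claim_ definition above) =====
theorem classify_questions_list_spec : Claim_equal_classify_questions_list := by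
  intro qs _
  unfold Spec_classify_questions_list classify_questions_list
  rw [pvAlt_eq]
  have h0 : ((PySem.Dict.empty.insert "Easy" ([] : List String)).insert "Medium" []).insert "Hard" []
      = PySem.Dict.mk [("Easy", []), ("Medium", []), ("Hard", [])] := rfl
  rw [h0, pvLoop]
  simp
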